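-- pv_equiv track=rewrite | github.com/mehekmehra/Automorphisms-on-Posets | evenFasterAndNicer.py | coversAreValid
-- ===== SOURCE A (Python) =====
-- def toRelationsDictionary(relationsList):
--     """ toRelationsDictionary makes a dictionary out of an array of 2-element arrays
--
--         parameters: relationsList: an array of 2-element arrays where the elements or the sub arrays are nodes
--
--         output: a dictionary where the keys are the first values in the 2 element arrays and the values
--                 are the second values in the sub arrays.
--     """
--     dictionary = {}
--     for i in relationsList:
--         dictionary.setdefault(i[0],[]).append(i[1])
--     return dictionary
--
-- def commonElement(list1, list2):
--     """ commonElement returns true if list1 and list2 share at least one common element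
--
--         parameters: list1, list2: lists that will be compared
--
--         output: boolean
--     """
--     res = False
--     for x in list1:
--         for y in list2:
--             if x == y:
--                 res = True
--                 return res
--     return res
--
-- def coversAreValid(relationsList):
--     """ coversAreValid returns a boolean corresponding to whether or not the provided covers are covers or if there are paths in which they are not covers
--
--         parameters: relationsList: an array of 2-element arrays where the elements or the sub arrays are nodes
--
--         output: boolean: true if covers are valid, false if covers are not valid
--     """
--     relationsDict = toRelationsDictionary(relationsList)
--     for relation in relationsList:
--         lower = relation[0]
--         greater = relation[1]
--         if lower in relationsDict and greater in relationsDict: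
--             if commonElement(relationsDict[lower], relationsDict[greater]):
--                 return False
--     return True
-- ===== SOURCE B (Python) =====
-- def coversAreValid(relationsList):
--     """Reverse-adjacency formulation: group edge sources by their common target,
--     then look for any parent pair (u, v) that is itself an edge."""
--     parents = {}
--     edges = set()
--     for r in relationsList:
--         a, b = r[0], r[1]
--         parents.setdefault(b, set()).add(a)
--         edges.add((a, b))
--     for group in parents.values():
--         for u in group:
--             for v in group:
--                 if (u, v) in edges:
--                     return False
--     return True
-- ===== Notes on version B (the rewrite author's own statement) =====
-- stated objective: alternative
-- what changed: B replaces A's per-edge successor-list intersection (dict of successors plus a nested commonElement scan per relation) by a reverse-adjacency map grouping edge sources by their common target plus an edge set, then searches each parent group for a pair that is itself an edge.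
import Mathlib
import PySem

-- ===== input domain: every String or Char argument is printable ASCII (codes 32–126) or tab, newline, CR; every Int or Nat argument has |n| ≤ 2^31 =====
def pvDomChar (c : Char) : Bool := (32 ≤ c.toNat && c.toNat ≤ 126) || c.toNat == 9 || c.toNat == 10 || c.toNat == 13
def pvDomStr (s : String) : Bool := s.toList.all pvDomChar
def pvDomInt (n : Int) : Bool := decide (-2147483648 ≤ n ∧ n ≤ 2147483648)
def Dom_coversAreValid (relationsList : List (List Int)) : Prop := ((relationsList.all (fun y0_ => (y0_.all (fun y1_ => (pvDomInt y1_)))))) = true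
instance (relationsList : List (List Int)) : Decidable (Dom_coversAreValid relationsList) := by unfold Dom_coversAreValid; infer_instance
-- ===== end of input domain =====

-- B replaces A's per-edge successor-intersection scan by a reverse-adjacency (parents) map plus an edge set; alternative decomposition, same results.


-- ===== PORT A =====
def toRelationsDictionary (relationsList : List (List Int)) : PySem.Dict Int (List Int) :=
  relationsList.foldl (fun d i =>
    match i with
    | a :: b :: _ => d.modify a [] (fun l => l ++ [b])   -- dictionary.setdefault(i[0],[]).append(i[1])
    | _ => d) PySem.Dict.empty                           -- (i[0]/i[1] raise outside Pre_)

def commonElement (list1 list2 : List Int) : Bool :=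
  list1.any (fun x => list2.any (fun y => x == y))       -- nested for-loops with early return on x == y

def coversAreValid (relationsList : List (List Int)) : Bool :=
  let relationsDict := toRelationsDictionary relationsList
  !(relationsList.any (fun relation =>
    match relation with
    | lower :: greater :: _ =>
        relationsDict.contains lower && relationsDict.contains greater &&
          commonElement (relationsDict.getD lower []) (relationsDict.getD greater [])
    | _ => false))                                       -- loop returning False on a hit, else True

-- ===== PORT B =====
def pvParentsEdges (relationsList : List (List Int)) :
    PySem.Dict Int (PySem.Set Int) × PySem.Set (Int × Int) :=
  relationsList.foldl (fun st r =>
    match r with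
    | a :: b :: _ =>
        (st.1.modify b [] (fun s => PySem.Set.add s a),  -- parents.setdefault(b, set()).add(a)
         PySem.Set.add st.2 (a, b))                      -- edges.add((a, b))
    | _ => st) (PySem.Dict.empty, PySem.Set.empty)

def coversAreValid_alt (relationsList : List (List Int)) : Bool :=
  let pe := pvParentsEdges relationsList
  !(pe.1.values.any (fun group =>
      group.any (fun u => group.any (fun v => PySem.Set.contains pe.2 (u, v)))))

-- ===== PRECONDITION & SPEC =====
-- Pre_ excludes exactly the inputs on which A raises IndexError: a sub-list with fewer than 2 elements.
def Pre_coversAreValid (relationsList : List (List Int)) : Prop :=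
  ∀ r ∈ relationsList, 2 ≤ r.length
instance (relationsList : List (List Int)) : Decidable (Pre_coversAreValid relationsList) := by
  unfold Pre_coversAreValid; infer_instance

def pvWitness_coversAreValid : List (List Int) := [[1, 2], [2, 3]]

def Spec_coversAreValid (relationsList : List (List Int)) (out : Bool) : Prop := out = coversAreValid_alt relationsList
instance (relationsList : List (List Int)) (out : Bool) : Decidable (Spec_coversAreValid relationsList out) := by unfold Spec_coversAreValid; infer_instance

-- ===== CLAIM (what is proved, stated in full; the proofs are below) =====
def Claim_equal_coversAreValid : Prop := ∀ (relationsList : List (List Int)), Dom_coversAreValid relationsList → Pre_coversAreValid relationsList → Spec_coversAreValid relationsList (coversAreValid relationsList)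

-- ===== LEMMAS AND PROOFS =====

-- the first two entries of a relation, as a pair (the edge it denotes)
def pvPair (r : List Int) : Int × Int := (r.headI, r.tail.headI)

theorem pvShape (r : List Int) (h : 2 ≤ r.length) : ∃ a b t, r = a :: b :: t := by
  match r with
  | a :: b :: t => exact ⟨a, b, t, rfl⟩
  | [] => simp at h
  | [a] => simp at h

theorem pvPair_cons (a b : Int) (t : List Int) : pvPair (a :: b :: t) = (a, b) := rfl

-- A's dictionary, rewritten as a fold over the edge pairs
theorem pvDictA_eq (rl : List (List Int)) (h : ∀ r ∈ rl, 2 ≤ r.length) :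
    toRelationsDictionary rl =
      (rl.map pvPair).foldl (fun d p => d.modify p.1 [] (fun l => l ++ [p.2])) PySem.Dict.empty := by
  unfold toRelationsDictionary
  rw [List.foldl_map]
  apply PySem.List.foldl_congr_mem
  intro acc r hr
  obtain ⟨a, b, t, rfl⟩ := pvShape r (h r hr)
  rfl

theorem pvDictA_getD (rl : List (List Int)) (h : ∀ r ∈ rl, 2 ≤ r.length) (a : Int) :
    (toRelationsDictionary rl).getD a [] =
      ((rl.map pvPair).filter (fun p => p.1 == a)).map (·.2) := by
  rw [pvDictA_eq rl h, PySem.Dict.getD_foldl_modify_append]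
  simp

theorem pvDictA_mem (rl : List (List Int)) (h : ∀ r ∈ rl, 2 ≤ r.length) (a z : Int) :
    z ∈ (toRelationsDictionary rl).getD a [] ↔ (a, z) ∈ rl.map pvPair := by
  rw [pvDictA_getD rl h a]
  simp only [List.mem_map, List.mem_filter, beq_iff_eq]
  constructor
  · rintro ⟨p, ⟨hp, rfl⟩, rfl⟩; exact hp
  · intro hp; exact ⟨(a, z), ⟨hp, rfl⟩, rfl⟩

theorem pvDictA_contains (rl : List (List Int)) (h : ∀ r ∈ rl, 2 ≤ r.length) (a : Int) :
    (toRelationsDictionary rl).contains a = true ↔ ∃ z, (a, z) ∈ rl.map pvPair := by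
  rw [pvDictA_eq rl h, PySem.Dict.contains_eq_decide_mem_keys,
    PySem.Dict.keys_foldl_modify_key]
  simp only [PySem.Dict.keys_empty]
  simp only [PySem.Set.update_nil_left, decide_eq_true_iff, PySem.Set.mem_ofList]
  constructor
  · intro ha
    obtain ⟨p, hp, rfl⟩ := List.mem_map.mp ha
    exact ⟨p.2, by simpa using hp⟩
  · rintro ⟨z, hz⟩
    exact List.mem_map.mpr ⟨(a, z), hz, rfl⟩

theorem pvA_bad_iff (rl : List (List Int)) (h : ∀ r ∈ rl, 2 ≤ r.length) :
    (coversAreValid rl = false) ↔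
      ∃ p ∈ rl.map pvPair, ∃ z, (p.1, z) ∈ rl.map pvPair ∧ (p.2, z) ∈ rl.map pvPair := by
  simp only [coversAreValid, Bool.not_eq_false', List.any_eq_true]
  constructor
  · rintro ⟨r, hr, hc⟩
    obtain ⟨a, b, t, rfl⟩ := pvShape r (h r hr)
    simp only [Bool.and_eq_true, commonElement, List.any_eq_true, beq_iff_eq] at hc
    obtain ⟨-, z, hz1, z', hz2, rfl⟩ := hc
    refine ⟨(a, b), ?_, z, ?_, ?_⟩
    · exact List.mem_map.mpr ⟨a :: b :: t, hr, rfl⟩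
    · exact (pvDictA_mem rl h a z).mp hz1
    · exact (pvDictA_mem rl h b z).mp hz2
  · rintro ⟨p, hp, z, h1, h2⟩
    obtain ⟨r, hr, rfl⟩ := List.mem_map.mp hp
    obtain ⟨a, b, t, rfl⟩ := pvShape r (h r hr)
    rw [pvPair_cons] at h1 h2
    refine ⟨a :: b :: t, hr, ?_⟩
    simp only [Bool.and_eq_true, commonElement, List.any_eq_true, beq_iff_eq]
    exact ⟨⟨(pvDictA_contains rl h a).mpr ⟨z, h1⟩, (pvDictA_contains rl h b).mpr ⟨z, h2⟩⟩,
      z, (pvDictA_mem rl h a z).mpr h1, z, (pvDictA_mem rl h b z).mpr h2, rfl⟩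

-- B's loop, rewritten as two folds over the edge pairs
theorem pvParentsEdges_eq (rl : List (List Int)) (h : ∀ r ∈ rl, 2 ≤ r.length) :
    pvParentsEdges rl =
      ((rl.map pvPair).foldl (fun d p => d.modify p.2 [] (fun s => PySem.Set.add s p.1)) PySem.Dict.empty,
       PySem.Set.ofList (rl.map pvPair)) := by
  unfold pvParentsEdges
  rw [PySem.Set.ofList_eq_foldl, List.foldl_map, List.foldl_map,
    ← PySem.List.foldl_prod_mk
      (f := fun d r => PySem.Dict.modify d (pvPair r).2 [] (fun s => PySem.Set.add s (pvPair r).1))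
      (g := fun s r => PySem.Set.add s (pvPair r))]
  apply PySem.List.foldl_congr_mem
  intro acc r hr
  obtain ⟨a, b, t, rfl⟩ := pvShape r (h r hr)
  rfl

theorem pvParentsFold_mem (l : List (Int × Int)) (d : PySem.Dict Int (PySem.Set Int)) (z y : Int) :
    y ∈ (l.foldl (fun d p => d.modify p.2 [] (fun s => PySem.Set.add s p.1)) d).getD z [] ↔
      y ∈ d.getD z [] ∨ ∃ p ∈ l, p.2 = z ∧ p.1 = y := by
  induction l generalizing d with
  | nil => simp
  | cons p t ih =>
    simp only [List.foldl_cons, ih, List.mem_cons]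
    rw [PySem.Dict.getD_modify]
    split_ifs with hz
    · subst hz
      rw [PySem.Set.mem_add]
      constructor
      · rintro ((hy | rfl) | ⟨q, hq, h1, h2⟩)
        · exact Or.inl hy
        · exact Or.inr ⟨p, Or.inl rfl, rfl, rfl⟩
        · exact Or.inr ⟨q, Or.inr hq, h1, h2⟩
      · rintro (hy | ⟨q, (rfl | hq), h1, h2⟩)
        · exact Or.inl (Or.inl hy)
        · exact Or.inl (Or.inr h2.symm)
        · exact Or.inr ⟨q, hq, h1, h2⟩
    · constructor
      · rintro (hy | ⟨q, hq, h1, h2⟩)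
        · exact Or.inl hy
        · exact Or.inr ⟨q, Or.inr hq, h1, h2⟩
      · rintro (hy | ⟨q, (rfl | hq), h1, h2⟩)
        · exact Or.inl hy
        · exact absurd h1.symm hz
        · exact Or.inr ⟨q, hq, h1, h2⟩

theorem pvParents_mem (rl : List (List Int)) (h : ∀ r ∈ rl, 2 ≤ r.length) (z y : Int) :
    y ∈ (pvParentsEdges rl).1.getD z [] ↔ (y, z) ∈ rl.map pvPair := by
  rw [pvParentsEdges_eq rl h]
  simp only [pvParentsFold_mem, PySem.Dict.getD_empty]
  constructor
  · rintro (hy | ⟨p, hp, h1, h2⟩)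
    · simp at hy
    · have : p = (y, z) := by cases p; simp_all
      exact this ▸ hp
  · intro hp; exact Or.inr ⟨(y, z), hp, rfl, rfl⟩

theorem pvB_bad_iff (rl : List (List Int)) (h : ∀ r ∈ rl, 2 ≤ r.length) :
    (coversAreValid_alt rl = false) ↔
      ∃ z u v, (u, z) ∈ rl.map pvPair ∧ (v, z) ∈ rl.map pvPair ∧ (u, v) ∈ rl.map pvPair := by
  have hnd : (pvParentsEdges rl).1.keys.Nodup := by
    rw [pvParentsEdges_eq rl h]
    exact PySem.Dict.nodup_keys_foldl_modify_key _ _ _ _ _ PySem.Dict.nodup_keys_empty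
  have hvals : (pvParentsEdges rl).1.values =
      (pvParentsEdges rl).1.keys.map (fun k => (pvParentsEdges rl).1.getD k []) :=
    PySem.Dict.values_eq_map_keys _ hnd []
  have hedge : ∀ u v : Int, PySem.Set.contains (pvParentsEdges rl).2 (u, v) = true ↔
      (u, v) ∈ rl.map pvPair := by
    intro u v
    rw [pvParentsEdges_eq rl h]
    simp [PySem.Set.contains, PySem.Set.mem_ofList]
  simp only [coversAreValid_alt, Bool.not_eq_false']
  rw [hvals, List.any_map]
  simp only [List.any_eq_true, Function.comp]
  constructor
  · rintro ⟨k, hk, u, hu, v, hv, hc⟩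
    exact ⟨k, u, v, (pvParents_mem rl h k u).mp hu, (pvParents_mem rl h k v).mp hv,
      (hedge u v).mp hc⟩
  · rintro ⟨z, u, v, h1, h2, h3⟩
    have hzk : z ∈ (pvParentsEdges rl).1.keys := by
      rw [pvParentsEdges_eq rl h, PySem.Dict.keys_foldl_modify_key]
      simp only [PySem.Dict.keys_empty]
      rw [PySem.Set.update_nil_left, PySem.Set.mem_ofList]
      exact List.mem_map.mpr ⟨(u, z), h1, rfl⟩
    exact ⟨z, hzk,
      u, (pvParents_mem rl h z u).mpr h1, v, (pvParents_mem rl h z v).mpr h2, (hedge u v).mpr h3⟩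

-- ===== VERDICT (by name: the statement is the Claim_ definition above) =====
theorem coversAreValid_spec : Claim_equal_coversAreValid := by
  intro rl _ hpre
  unfold Spec_coversAreValid
  have hA := pvA_bad_iff rl hpre
  have hB := pvB_bad_iff rl hpre
  have hiff : (coversAreValid rl = false) ↔ (coversAreValid_alt rl = false) := by
    rw [hA, hB]
    constructor
    · rintro ⟨p, hp, z, h1, h2⟩; exact ⟨z, p.1, p.2, h1, h2, by simpa using hp⟩
    · rintro ⟨z, u, v, h1, h2, h3⟩; exact ⟨(u, v), h3, z, h1, h2⟩
  cases hca : coversAreValid rl <;> cases hcb : coversAreValid_alt rl <;> simp_all
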